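-- pv_equiv track=rewrite | github.com/rahul-challa/ML-Runtime-Profiler | profiler.py | _generate_sample_texts
-- ===== SOURCE A (Python) =====
-- from typing import List, Dict, Any, Optional
--
-- def _generate_sample_texts(num_samples: int, sequence_length: int) -> List[str]:
--     """Generate sample texts for profiling."""
--     sample_texts = [
--         "This is a sample text for machine learning inference profiling.",
--         "The quick brown fox jumps over the lazy dog.",
--         "Machine learning models require careful performance analysis.",
--         "Transformer architectures have revolutionized natural language processing.",
--         "Profiling helps identify bottlenecks in model inference.",
--         "GPU acceleration can significantly improve inference speed.",
--         "Attention mechanisms are computationally expensive but effective.",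
--         "Batch processing can improve throughput in production systems.",
--         "Memory usage is a critical consideration for large models.",
--         "Optimization techniques can reduce inference latency."
--     ]
--
--     # Repeat and truncate to get desired number of samples
--     texts = []
--     for i in range(num_samples):
--         text = sample_texts[i % len(sample_texts)]
--         # Truncate or pad to approximate sequence length
--         words = text.split()
--         if len(words) > sequence_length // 5:  # Rough estimate
--             words = words[:sequence_length // 5]
--         texts.append(" ".join(words))
--
--     return texts
-- ===== SOURCE B (Python) =====
-- def _generate_sample_texts(num_samples: int, sequence_length: int):
--     """Generate sample texts: build the table of processed texts once, then cycle it."""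
--     sample_texts = [
--         "This is a sample text for machine learning inference profiling.",
--         "The quick brown fox jumps over the lazy dog.",
--         "Machine learning models require careful performance analysis.",
--         "Transformer architectures have revolutionized natural language processing.",
--         "Profiling helps identify bottlenecks in model inference.",
--         "GPU acceleration can significantly improve inference speed.",
--         "Attention mechanisms are computationally expensive but effective.",
--         "Batch processing can improve throughput in production systems.",
--         "Memory usage is a critical consideration for large models.",
--         "Optimization techniques can reduce inference latency."
--     ]
--     # Phase 1: process each base text exactly once.
--     k = sequence_length // 5
--     processed = []
--     for text in sample_texts:
--         words = text.split()
--         if len(words) > k: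
--             words = words[:k]
--         processed.append(" ".join(words))
--     # Phase 2: cycle the precomputed table; no string work here.
--     n = len(processed)
--     return [processed[i % n] for i in range(num_samples)]
-- ===== Notes on version B (the rewrite author's own statement) =====
-- stated objective: faster
-- what changed: B splits A's single per-sample loop (which re-splits, truncates and re-joins a base string for every sample) into a build-once table of the 10 processed texts followed by a cycling lookup pass processed[i % n] that does no string work.
import Mathlib
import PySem

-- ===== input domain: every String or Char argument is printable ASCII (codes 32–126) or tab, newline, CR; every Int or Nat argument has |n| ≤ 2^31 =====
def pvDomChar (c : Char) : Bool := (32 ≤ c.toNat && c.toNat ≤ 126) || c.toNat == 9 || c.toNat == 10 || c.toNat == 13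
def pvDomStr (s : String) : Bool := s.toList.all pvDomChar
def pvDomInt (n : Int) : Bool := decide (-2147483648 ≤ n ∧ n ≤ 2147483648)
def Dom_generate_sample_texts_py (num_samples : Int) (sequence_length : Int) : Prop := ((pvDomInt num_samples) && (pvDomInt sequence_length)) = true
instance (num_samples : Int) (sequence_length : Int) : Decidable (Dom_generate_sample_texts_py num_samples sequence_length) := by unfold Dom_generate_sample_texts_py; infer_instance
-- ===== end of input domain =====

-- B builds the 10 processed texts once and then cycles the table by i % 10; return value proved equal to A's everywhere.

-- The fixed literal list shared by both Pythons.
def pvSampleTexts : List String := [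
  "This is a sample text for machine learning inference profiling.",
  "The quick brown fox jumps over the lazy dog.",
  "Machine learning models require careful performance analysis.",
  "Transformer architectures have revolutionized natural language processing.",
  "Profiling helps identify bottlenecks in model inference.",
  "GPU acceleration can significantly improve inference speed.",
  "Attention mechanisms are computationally expensive but effective.",
  "Batch processing can improve throughput in production systems.",
  "Memory usage is a critical consideration for large models.",
  "Optimization techniques can reduce inference latency."]

-- ===== PORT A =====
-- 'sample_texts[i % len(sample_texts)]' never raises (0 ≤ i % 10 < 10), so pyGetD with default "" is exact here.
def generate_sample_texts_py (num_samples : Int) (sequence_length : Int) : List String :=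
  let sample_texts := pvSampleTexts
  (PySem.List.pyRange 0 num_samples 1).foldl (fun texts i =>
    let text := PySem.List.pyGetD sample_texts (PySem.Int.mod i (sample_texts.length : Int)) ""
    let words := PySem.Str.split₀ text
    let words := if (words.length : Int) > PySem.Int.floordiv sequence_length 5
                 then PySem.List.slice words none (some (PySem.Int.floordiv sequence_length 5))
                 else words
    texts ++ [PySem.Str.join " " words]) []

-- ===== PORT B =====
-- 'processed[i % n]' never raises (0 ≤ i % 10 < 10), so pyGetD with default "" is exact here.
def generate_sample_texts_py_alt (num_samples : Int) (sequence_length : Int) : List String :=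
  let k := PySem.Int.floordiv sequence_length 5
  let processed := pvSampleTexts.foldl (fun processed text =>
    let words := PySem.Str.split₀ text
    let words := if (words.length : Int) > k
                 then PySem.List.slice words none (some k)
                 else words
    processed ++ [PySem.Str.join " " words]) []
  let n := (processed.length : Int)
  (PySem.List.pyRange 0 num_samples 1).map (fun i =>
    PySem.List.pyGetD processed (PySem.Int.mod i n) "")

-- ===== PRECONDITION & SPEC =====
def Spec_generate_sample_texts_py (num_samples : Int) (sequence_length : Int) (out : List String) : Prop := out = generate_sample_texts_py_alt num_samples sequence_length
instance (num_samples : Int) (sequence_length : Int) (out : List String) : Decidable (Spec_generate_sample_texts_py num_samples sequence_length out) := by unfold Spec_generate_sample_texts_py; infer_instance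

-- ===== CLAIM (what is proved, stated in full; the proofs are below) =====
def Claim_equal_generate_sample_texts_py : Prop := ∀ (num_samples : Int) (sequence_length : Int), Dom_generate_sample_texts_py num_samples sequence_length → Spec_generate_sample_texts_py num_samples sequence_length (generate_sample_texts_py num_samples sequence_length)

-- ===== LEMMAS AND PROOFS =====

-- ===== VERDICT (by name: the statement is the Claim_ definition above) =====
theorem generate_sample_texts_py_spec : Claim_equal_generate_sample_texts_py := by
  intro n s _
  unfold Spec_generate_sample_texts_py generate_sample_texts_py generate_sample_texts_py_alt
  simp only [PySem.List.foldl_append_singleton_eq_map, List.nil_append]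
  apply List.map_congr_left
  intro i hi
  have h0 : (0:Int) ≤ PySem.Int.mod i (pvSampleTexts.length : Int) :=
    PySem.Int.mod_nonneg _ (by simp [pvSampleTexts])
  have hlt : PySem.Int.mod i (pvSampleTexts.length : Int) < (pvSampleTexts.length : Int) :=
    PySem.Int.mod_lt _ (by simp [pvSampleTexts])
  have hlen : ((pvSampleTexts.map (fun text =>
      PySem.Str.join " " (if ((PySem.Str.split₀ text).length : Int) > PySem.Int.floordiv s 5
        then PySem.List.slice (PySem.Str.split₀ text) none (some (PySem.Int.floordiv s 5))
        else PySem.Str.split₀ text))).length : Int) = (pvSampleTexts.length : Int) := by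
    simp
  rw [hlen, PySem.List.pyGetD_eq_getElem pvSampleTexts _ h0 hlt,
      PySem.List.pyGetD_eq_getElem _ _ h0 (by simpa using hlt)]
  simp
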